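-- pv_equiv track=rewrite | github.com/uwoobeat/baekjoon | python/17829_contest_arr.py | solve
-- ===== SOURCE A (Python) =====
-- def solve(arr, n):
--     if n == 1:
--         return arr[0][0]
--
--     newArr = [[] for _ in range(n//2)]
--
--     for i in range(0, n, 2):
--         for j in range(0, n, 2):
--             newArr[i//2].append(sorted([arr[i][j], arr[i][j+1], arr[i+1][j], arr[i+1][j+1]])[2])
--
--     return solve(newArr, n//2)
-- ===== SOURCE B (Python) =====
-- def solve(arr, n):
--     # Divide-and-conquer over index quadrants: no intermediate grids are built.
--     def rec(i, j, size):
--         if size == 1: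
--             return arr[i][j]
--         h = size // 2
--         return sorted([rec(i, j, h), rec(i, j + h, h),
--                        rec(i + h, j, h), rec(i + h, j + h, h)])[2]
--     return rec(0, 0, n)
-- ===== Notes on version B (the rewrite author's own statement) =====
-- stated objective: alternative
-- what changed: Replaces A's level-by-level reduction (building a new half-size grid at each of log n levels) by a direct divide-and-conquer recursion over index quadrants that builds no intermediate grids.
import Mathlib
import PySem

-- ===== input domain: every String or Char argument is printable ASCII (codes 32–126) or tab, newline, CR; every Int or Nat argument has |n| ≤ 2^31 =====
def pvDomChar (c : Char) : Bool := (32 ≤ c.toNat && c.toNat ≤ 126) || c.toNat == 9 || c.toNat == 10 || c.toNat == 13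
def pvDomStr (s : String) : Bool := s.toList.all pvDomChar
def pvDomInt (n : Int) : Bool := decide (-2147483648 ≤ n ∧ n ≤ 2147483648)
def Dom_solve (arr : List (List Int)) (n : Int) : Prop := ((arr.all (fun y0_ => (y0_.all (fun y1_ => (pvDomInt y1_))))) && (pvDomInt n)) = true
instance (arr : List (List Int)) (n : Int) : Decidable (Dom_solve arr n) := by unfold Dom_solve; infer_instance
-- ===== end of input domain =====

-- B replaces A's level-by-level grid reduction with a quadrant divide-and-conquer
-- recursion over indices (alternative decomposition, no intermediate grids; same cost).

-- ===== PORT A =====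
-- shared primitive: sorted(xs)[2]
def py2nd (xs : List Int) : Int := PySem.List.pyGetD (PySem.List.sorted xs (fun x => x) false) 2 0
-- shared primitive: arr[i][j] (total form; Pre_solve keeps all accesses in range)
def cell (arr : List (List Int)) (i j : Int) : Int :=
  PySem.List.pyGetD (PySem.List.pyGetD arr i []) j 0

-- A's block value sorted([arr[i][j], arr[i][j+1], arr[i+1][j], arr[i+1][j+1]])[2]
def blockVal (arr : List (List Int)) (i j : Int) : Int :=
  py2nd [cell arr i j, cell arr i (j+1), cell arr (i+1) j, cell arr (i+1) (j+1)]

-- A's loop nest building newArr (newArr[i//2].append(v) modelled as get-then-set at i//2)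
def stepA (arr : List (List Int)) (n : Int) : List (List Int) :=
  (PySem.List.pyRange 0 n 2).foldl (fun acc i =>
    (PySem.List.pyRange 0 n 2).foldl (fun acc2 j =>
      PySem.List.pySetD acc2 (PySem.Int.floordiv i 2)
        (PySem.List.pyGetD acc2 (PySem.Int.floordiv i 2) [] ++ [blockVal arr i j])) acc)
    ((PySem.List.pyRange 0 (PySem.Int.floordiv n 2) 1).map (fun _ => ([] : List Int)))

-- A's recursion; fuel is only a totality guard (64 > log2 of any n admitted by Dom_solve)
def solveFuelA : Nat → List (List Int) → Int → Int
  | 0, _, _ => 0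
  | f+1, arr, n =>
    if n == 1 then cell arr 0 0
    else solveFuelA f (stepA arr n) (PySem.Int.floordiv n 2)

def solve (arr : List (List Int)) (n : Int) : Int := solveFuelA 64 arr n

-- ===== PORT B =====
-- B's inner rec(i, j, size); fuel is only a totality guard
def recB (arr : List (List Int)) : Nat → Int → Int → Int → Int
  | 0, _, _, _ => 0
  | f+1, i, j, size =>
    if size == 1 then cell arr i j
    else
      let h := PySem.Int.floordiv size 2
      py2nd [recB arr f i j h, recB arr f i (j+h) h,
             recB arr f (i+h) j h, recB arr f (i+h) (j+h) h]

def solve_alt (arr : List (List Int)) (n : Int) : Int := recB arr 64 0 0 n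

-- ===== PRECONDITION & SPEC =====
-- Exactly where the Python A returns: n a power of two and the first n rows cover n columns
-- (otherwise A ends in RecursionError or IndexError). The bound k < 32 is implied by the
-- |n| ≤ 2^31 input domain Dom_solve, so it narrows nothing inside the domain.
def Pre_solve (arr : List (List Int)) (n : Int) : Prop :=
  (∃ k : Nat, k < 32 ∧ n = 2^k) ∧ n ≤ (arr.length : Int) ∧
    ∀ row ∈ arr.take n.toNat, n ≤ (row.length : Int)
instance (arr : List (List Int)) (n : Int) : Decidable (Pre_solve arr n) := by
  unfold Pre_solve; infer_instance

def pvWitness_solve : List (List Int) × Int := ([[1, 2], [3, 4]], 2)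

def Spec_solve (arr : List (List Int)) (n : Int) (out : Int) : Prop := out = solve_alt arr n
instance (arr : List (List Int)) (n : Int) (out : Int) : Decidable (Spec_solve arr n out) := by
  unfold Spec_solve; infer_instance

-- ===== CLAIM (what is proved, stated in full; the proofs are below) =====
def Claim_equal_solve : Prop := ∀ (arr : List (List Int)) (n : Int),
  Dom_solve arr n → Pre_solve arr n → Spec_solve arr n (solve arr n)

-- ===== LEMMAS AND PROOFS =====

lemma pyRange_two (m : Nat) :
    PySem.List.pyRange 0 (2*(m:Int)) 2 = (List.range m).map (fun t : Nat => (2*(t:Int))) := by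
  rw [PySem.List.pyRange_of_pos _ _ (by norm_num)]
  rcases Nat.eq_zero_or_pos m with h | h
  · subst h; simp
  · rw [if_pos (by exact_mod_cast by omega : (0:Int) < 2*(m:Int))]
    have : ((2*(m:Int) - 0 + 2 - 1) / 2).toNat = m := by omega
    rw [this]
    simp

lemma innerFold {β : Type} (g : β → Int) :
    ∀ (js : List β) (acc : List (List Int)) (t : Nat), t < acc.length →
    js.foldl (fun acc2 j => PySem.List.pySetD acc2 (t : Int)
        (PySem.List.pyGetD acc2 (t : Int) [] ++ [g j])) acc
      = acc.set t (acc.getD t [] ++ js.map g)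
  | [], acc, t, ht => by
    simp only [List.foldl_nil, List.map_nil, List.append_nil]
    rw [List.getD_eq_getElem _ _ ht, List.set_getElem_self]
  | j :: js, acc, t, ht => by
    simp only [List.foldl_cons]
    rw [PySem.List.pySetD_of_nonneg _ _ (by positivity), Int.toNat_natCast]
    rw [innerFold g js _ t (by simpa using ht)]
    rw [List.set_set]
    congr 1
    rw [PySem.List.pyGetD_natCast]
    rw [List.getD_eq_getElem _ _ ht, List.getD_eq_getElem _ _ (by simpa using ht)]
    rw [List.getElem_set, if_pos rfl]
    simp

lemma set_map_range {α : Type} (f : Nat → α) (m s : Nat) (v : α) :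
    ((List.range m).map f).set s v
      = (List.range m).map (fun r => if r = s then v else f r) := by
  apply List.ext_getElem (by simp)
  intro i h1 h2
  simp only [List.getElem_set, List.getElem_map, List.getElem_range]
  by_cases h : s = i
  · subst h; simp
  · rw [if_neg h, if_neg (fun hh => h hh.symm)]

lemma floordiv_two_mul (r : Nat) : PySem.Int.floordiv (2*(r:Int)) 2 = (r:Int) := by
  rw [PySem.Int.floordiv_eq_ediv_of_pos (by norm_num)]
  exact Int.mul_ediv_cancel_left _ (by norm_num)

lemma outerAux (arr : List (List Int)) (m : Nat) :
    ∀ (s : Nat), s ≤ m →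
    (List.range s).foldl (fun acc r =>
        (List.range m).foldl (fun acc2 (c : Nat) => PySem.List.pySetD acc2 ((r:Nat) : Int)
          (PySem.List.pyGetD acc2 ((r:Nat) : Int) [] ++ [blockVal arr (2*(r:Int)) (2*(c:Int))])) acc)
      ((List.range m).map (fun _ => ([] : List Int)))
      = (List.range m).map (fun r : Nat =>
          if r < s then (List.range m).map (fun c : Nat => blockVal arr (2*(r:Int)) (2*(c:Int))) else []) := by
  intro s
  induction s with
  | zero => intro _; simp
  | succ s ih =>
    intro hs
    rw [List.range_succ, List.foldl_append, ih (by omega), List.foldl_cons, List.foldl_nil]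
    rw [innerFold _ (List.range m) _ s (by simp; omega)]
    rw [List.getD_eq_getElem _ _ (by simp; omega), List.getElem_map, List.getElem_range,
      if_neg (by omega), List.nil_append]
    rw [set_map_range]
    apply List.map_congr_left
    intro r _
    by_cases h : r = s
    · subst h; simp
    · rw [if_neg h]
      by_cases h2 : r < s
      · rw [if_pos h2, if_pos (by omega)]
      · rw [if_neg h2, if_neg (by omega)]

lemma stepChar (arr : List (List Int)) (m : Nat) :
    stepA arr (2*(m:Int))
      = (List.range m).map (fun r : Nat => (List.range m).map (fun c : Nat =>
          blockVal arr (2*(r:Int)) (2*(c:Int)))) := by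
  unfold stepA
  rw [floordiv_two_mul, pyRange_two, PySem.List.pyRange_one]
  simp only [Int.sub_zero, Int.toNat_natCast, List.map_map, List.foldl_map,
    floordiv_two_mul, Function.comp_def]
  rw [show (List.map (fun k : Nat => ([] : List Int)) (List.range m))
        = (List.range m).map (fun _ => ([] : List Int)) from rfl]
  rw [outerAux arr m m (le_refl m)]
  apply List.map_congr_left
  intro r hr
  rw [if_pos (by simpa using hr)]



lemma two_pow_succ_ne_one (t : Nat) : ((2:Int)^(t+1) == 1) = false := by
  have h1 : (1:Int) ≤ 2^t := one_le_pow₀ (by norm_num)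
  have : (2:Int)^(t+1) = 2*2^t := by ring
  simp only [beq_eq_false_iff_ne, ne_eq]
  omega

lemma half_two_pow (t : Nat) : PySem.Int.floordiv ((2:Int)^(t+1)) 2 = 2^t := by
  rw [PySem.Int.floordiv_eq_ediv_of_pos (by norm_num), pow_succ]
  exact Int.mul_ediv_cancel _ (by norm_num)

lemma cellStep (arr : List (List Int)) (m : Nat) (i j : Int)
    (hi0 : 0 ≤ i) (hi : i < (m:Int)) (hj0 : 0 ≤ j) (hj : j < (m:Int)) :
    cell (stepA arr (2*(m:Int))) i j = blockVal arr (2*i) (2*j) := by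
  rw [stepChar]
  unfold cell
  rw [PySem.List.pyGetD_eq_getElem _ _ hi0 (by simp; omega)]
  rw [List.getElem_map, List.getElem_range]
  rw [PySem.List.pyGetD_eq_getElem _ _ hj0 (by simp; omega)]
  rw [List.getElem_map, List.getElem_range]
  rw [Int.toNat_of_nonneg hi0, Int.toNat_of_nonneg hj0]

lemma recB_one (ar : List (List Int)) (f : Nat) (i j : Int) :
    recB ar (f+1) i j 1 = cell ar i j := by simp [recB]

lemma recB_two (ar : List (List Int)) (g : Nat) (i j : Int) :
    recB ar (g+2) i j 2
      = py2nd [cell ar i j, cell ar i (j+1), cell ar (i+1) j, cell ar (i+1) (j+1)] := by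
  norm_num [recB, show PySem.Int.floordiv (2:Int) 2 = 1 from by decide]

lemma recB_step (arr : List (List Int)) (m : Nat) :
    ∀ (t f g : Nat) (i j : Int), t < f → t+1 < g → 0 ≤ i → 0 ≤ j →
      i + 2^t ≤ (m:Int) → j + 2^t ≤ (m:Int) →
    recB (stepA arr (2*(m:Int))) f i j (2^t) = recB arr g (2*i) (2*j) (2^(t+1)) := by
  intro t
  induction t with
  | zero =>
    intro f g i j hf hg hi0 hj0 hi hj
    simp only [pow_zero] at hi hj
    match f, g with
    | f'+1, g''+2 =>
      rw [pow_zero, show ((2:Int)^(0+1)) = 2 from by norm_num, recB_one, recB_two]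
      rw [cellStep arr m i j hi0 (by omega) hj0 (by omega)]
      rfl
  | succ t ih =>
    intro f g i j hf hg hi0 hj0 hi hj
    match f, g with
    | f'+1, g'+1 =>
      simp only [recB]
      rw [if_neg (by simpa using two_pow_succ_ne_one t), half_two_pow]
      rw [if_neg (by simpa using two_pow_succ_ne_one (t+1)), half_two_pow]
      have hpow : (0:Int) <= 2^t := by positivity
      have hsplit : (2:Int)^(t+1) = 2^t + 2^t := by ring
      have e1 := ih f' g' i j (by omega) (by omega) hi0 hj0 (by omega) (by omega)
      have e2 := ih f' g' i (j + 2^t) (by omega) (by omega) hi0 (by omega) (by omega) (by omega)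
      have e3 := ih f' g' (i + 2^t) j (by omega) (by omega) (by omega) hj0 (by omega) (by omega)
      have e4 := ih f' g' (i + 2^t) (j + 2^t) (by omega) (by omega) (by omega) (by omega) (by omega) (by omega)
      rw [e1, e2, e3, e4]
      have hm : (2:Int) * (j + 2 ^ t) = 2*j + 2^(t+1) := by ring
      have hm2 : (2:Int) * (i + 2 ^ t) = 2*i + 2^(t+1) := by ring
      rw [hm, hm2]

lemma solveA_eq (k : Nat) :
    ∀ (arr : List (List Int)) (f g : Nat), k < f → k < g →
    solveFuelA f arr (2^k) = recB arr g 0 0 (2^k) := by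
  induction k with
  | zero =>
    intro arr f g hf hg
    match f, g with
    | f'+1, g'+1 => simp [solveFuelA, recB]
  | succ k ih =>
    intro arr f g hf hg
    match f, g with
    | f'+1, g'+1 =>
      show solveFuelA (f'+1) arr (2^(k+1)) = recB arr (g'+1) 0 0 (2^(k+1))
      simp only [solveFuelA]
      rw [if_neg (by simpa using two_pow_succ_ne_one k), half_two_pow]
      have hcast : (2:Int)^(k+1) = 2*((2^k : Nat) : Int) := by push_cast; ring
      rw [hcast]
      rw [ih (stepA arr (2*((2^k : Nat) : Int))) f' (k+1) (by omega) (by omega)]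
      have hb : (0:Int) + 2^k <= ((2^k : Nat) : Int) := by push_cast; norm_num
      have h5 := recB_step arr (2^k) k (k+1) (g'+1) 0 0 (by omega) (by omega) (by omega) (by omega) hb hb
      simp only [mul_zero] at h5
      rw [hcast] at h5
      exact h5

-- ===== VERDICT (by name: the statement is the Claim_ definition above) =====
theorem solve_spec : Claim_equal_solve := by
  intro arr n _ hpre
  obtain ⟨⟨k, hk, rfl⟩, -, -⟩ := hpre
  unfold Spec_solve solve solve_alt
  exact solveA_eq k arr 64 64 (by omega) (by omega)
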